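-- pv_equiv track=rewrite | github.com/QinjianZheng/tech_interview_python | 1525_numSplits.py | numSplits3
-- ===== SOURCE A (Python) =====
-- import collections
--
-- def numSplits3(s: str) -> int:
--     # https://leetcode.com/problems/number-of-good-ways-to-split-a-string/discuss/755264/Python-O(N)-Sliding-Window
--     res = 0
--     left_counter = collections.Counter()
--     right_counter = collections.Counter(s)
--     for c in s:
--         left_counter[c] += 1
--         right_counter[c] -= 1
--         if right_counter[c] == 0:
--             del right_counter[c]
--         if len(left_counter) == len(right_counter):
--             res += 1
--     return res
-- ===== SOURCE B (Python) =====
-- def numSplits3(s: str) -> int: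
--     prefix = []
--     seen = set()
--     for c in s:
--         seen.add(c)
--         prefix.append(len(seen))
--     suffix_rev = []
--     seen = set()
--     for c in reversed(s):
--         seen.add(c)
--         suffix_rev.append(len(seen))
--     suffix = suffix_rev[::-1]
--     return sum(1 for i in range(len(s) - 1) if prefix[i] == suffix[i + 1])
-- ===== Notes on version B (the rewrite author's own statement) =====
-- stated objective: alternative
-- what changed: Replaces the incremental two-Counter sliding window with building prefix/suffix distinct-count tables in two passes plus a separate comparison loop over split points.
import Mathlib
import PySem

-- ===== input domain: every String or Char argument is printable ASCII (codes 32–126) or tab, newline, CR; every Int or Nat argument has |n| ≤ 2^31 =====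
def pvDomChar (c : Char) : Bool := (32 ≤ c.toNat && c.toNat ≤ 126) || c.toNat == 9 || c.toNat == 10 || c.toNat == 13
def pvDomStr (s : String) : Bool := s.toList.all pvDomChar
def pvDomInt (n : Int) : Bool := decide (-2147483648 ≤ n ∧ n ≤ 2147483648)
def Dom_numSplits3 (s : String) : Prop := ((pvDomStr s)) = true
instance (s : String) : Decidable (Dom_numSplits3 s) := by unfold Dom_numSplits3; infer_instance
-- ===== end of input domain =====

-- B replaces A's incremental two-Counter sliding window by prefix/suffix distinct-count
-- tables built in two passes plus a separate comparison loop (objective: alternative).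

-- ===== PORT A =====
-- one loop iteration of A: update left/right counters, delete exhausted key, bump res
def stepA (st : Int × PySem.Dict Char Int × PySem.Dict Char Int) (c : Char) :
    Int × PySem.Dict Char Int × PySem.Dict Char Int :=
  let left := st.2.1.modify c 0 (· + 1)
  let right := st.2.2.modify c 0 (· - 1)
  let right := if right.getD c 0 == 0 then right.erase c else right
  (if left.size == right.size then st.1 + 1 else st.1, left, right)

def numSplits3 (s : String) : Int :=
  (s.toList.foldl stepA (0, PySem.Dict.empty, PySem.Dict.counter s.toList)).1

-- ===== PORT B =====
-- one iteration of B's scan: add char to the seen-set, append its size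
def stepB (st : PySem.Set Char × List Int) (c : Char) : PySem.Set Char × List Int :=
  let seen := PySem.Set.add st.1 c
  (seen, st.2 ++ [PySem.Set.len seen])

-- running distinct-character counts of the prefixes of cs (B's first two loops)
def pvScanDistinct (cs : List Char) : List Int :=
  (cs.foldl stepB (PySem.Set.empty, [])).2

def numSplits3_alt (s : String) : Int :=
  (PySem.List.pyRange 0 (PySem.Str.len s - 1)).foldl
    (fun acc i =>
      if PySem.List.pyGetD (pvScanDistinct s.toList) i 0
           == PySem.List.pyGetD ((pvScanDistinct s.toList.reverse).reverse) (i + 1) 0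
      then acc + 1 else acc) 0

-- ===== PRECONDITION & SPEC =====
def Spec_numSplits3 (s : String) (out : Int) : Prop := out = numSplits3_alt s
instance (s : String) (out : Int) : Decidable (Spec_numSplits3 s out) := by unfold Spec_numSplits3; infer_instance

-- ===== CLAIM (what is proved, stated in full; the proofs are below) =====
def Claim_equal_numSplits3 : Prop := ∀ (s : String), Dom_numSplits3 s → Spec_numSplits3 s (numSplits3 s)

-- ===== LEMMAS AND PROOFS =====

-- number of distinct characters of a list
def dcN (l : List Char) : Nat := (PySem.Set.ofList l).length

-- abstract model of A's loop: t = processed prefix, r = remaining suffix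
def modelCount (t r : List Char) : Int :=
  match r with
  | [] => 0
  | c :: r' => (if dcN (t ++ [c]) = dcN r' then (1 : Int) else 0) + modelCount (t ++ [c]) r'

-- the common closed form both ports are reduced to
def gSum (cs : List Char) (n : Nat) : Int :=
  ((List.range n).map (fun i => if dcN (cs.take (i + 1)) = dcN (cs.drop (i + 1)) then (1 : Int) else 0)).sum

lemma len_eq_dc (ks m : List Char) (hnd : ks.Nodup) (hm : ∀ x, x ∈ ks ↔ x ∈ m) :
    ks.length = dcN m := by
  have : ks.Perm (PySem.Set.ofList m) := by
    rw [List.perm_ext_iff_of_nodup hnd (PySem.Set.nodup_ofList m)]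
    intro a; rw [hm a, PySem.Set.mem_ofList]
  exact this.length_eq

lemma dcN_pos (c : Char) (l : List Char) : dcN (c :: l) ≠ 0 := by
  have : c ∈ PySem.Set.ofList (c :: l) := (PySem.Set.mem_ofList _ _).2 (List.mem_cons_self)
  unfold dcN
  exact List.ne_nil_of_mem this |> fun h => by simpa [List.length_eq_zero_iff] using h

-- erase lemmas (PySem.Dict exposes none; proved from the definition)
lemma find?_filter_ne (items : List (Char × Int)) (k x : Char) (h : x ≠ k) :
    (items.filter (fun p => !(p.1 == k))).find? (fun p => p.1 == x)
      = items.find? (fun p => p.1 == x) := by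
  induction items with
  | nil => simp
  | cons p rest ih =>
    by_cases hpk : p.1 = k
    · have hk : (k == x) = false := beq_eq_false_iff_ne.mpr (Ne.symm h)
      simp [hpk, hk, ih]
    · by_cases hx : p.1 = x
      · simp [hx, h]
      · simp [hpk, hx, ih]

lemma get?_erase_of_ne (d : PySem.Dict Char Int) (k x : Char) (h : x ≠ k) :
    (d.erase k).get? x = d.get? x := by
  simp [PySem.Dict.erase, PySem.Dict.get?, find?_filter_ne d.items k x h]

lemma get?_erase_self (d : PySem.Dict Char Int) (k : Char) :
    (d.erase k).get? k = none := by
  simp only [PySem.Dict.erase, PySem.Dict.get?, Option.map_eq_none_iff, List.find?_eq_none]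
  intro a hmem
  simpa using (List.of_mem_filter hmem)

lemma contains_erase (d : PySem.Dict Char Int) (k x : Char) :
    (d.erase k).contains x = (d.contains x && !(x == k)) := by
  by_cases hxk : x = k
  · subst hxk
    have : (d.erase x).get? x = none := get?_erase_self d x
    rw [PySem.Dict.get?_eq_none_iff_contains] at this
    simp [this]
  · have : (d.erase k).get? x = d.get? x := get?_erase_of_ne d k x hxk
    have h2 := PySem.Dict.contains_eq_isSome_get? (d := d.erase k) (k := x)
    have h3 := PySem.Dict.contains_eq_isSome_get? (d := d) (k := x)
    simp [h2, h3, this, hxk]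

lemma nodup_keys_erase (d : PySem.Dict Char Int) (k : Char) (h : d.keys.Nodup) :
    (d.erase k).keys.Nodup := by
  refine h.sublist ?_
  simpa [PySem.Dict.erase, PySem.Dict.keys] using
    List.Sublist.map (fun p : Char × Int => p.1)
      (List.filter_sublist (p := fun p : Char × Int => !(p.1 == k)) (l := d.items))

-- A's loop invariant: res accumulates modelCount
lemma foldA (r : List Char) : ∀ (t : List Char) (res : Int) (left right : PySem.Dict Char Int),
    left.keys.Nodup → (∀ x, left.contains x = true ↔ x ∈ t) →
    right.keys.Nodup → (∀ x, right.contains x = true ↔ x ∈ r) →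
    (∀ x, right.getD x 0 = (r.count x : Int)) →
    (r.foldl stepA (res, left, right)).1 = res + modelCount t r := by
  induction r with
  | nil => intro t res left right _ _ _ _ _; simp [modelCount]
  | cons c r' ih =>
    intro t res left right hln hlm hrn hrm hrv
    rw [List.foldl_cons]
    set left' := left.modify c 0 (· + 1) with hL
    set right1 := right.modify c 0 (· - 1) with hR1
    set right2 := if right1.getD c 0 == 0 then right1.erase c else right1 with hR2
    have hstep : stepA (res, left, right) c
        = (if left'.size == right2.size then res + 1 else res, left', right2) := rfl
    have hl'n : left'.keys.Nodup := by
      rw [hL, PySem.Dict.keys_modify]; exact PySem.Dict.nodup_keys_insert _ _ _ hln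
    have hl'm : ∀ x, left'.contains x = true ↔ x ∈ t ++ [c] := by
      intro x
      rw [hL, PySem.Dict.contains_modify]
      simp only [Bool.or_eq_true, beq_iff_eq, hlm x, List.mem_append, List.mem_singleton]
      tauto
    have hr1n : right1.keys.Nodup := by
      rw [hR1, PySem.Dict.keys_modify]; exact PySem.Dict.nodup_keys_insert _ _ _ hrn
    have hr1m : ∀ x, right1.contains x = true ↔ x ∈ c :: r' := by
      intro x
      rw [hR1, PySem.Dict.contains_modify]
      simp only [Bool.or_eq_true, beq_iff_eq, hrm x, List.mem_cons]
      tauto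
    have hr1v : ∀ x, right1.getD x 0 = (r'.count x : Int) := by
      intro x
      rw [hR1, PySem.Dict.getD_modify]
      by_cases hxc : x = c
      · subst hxc
        rw [if_pos rfl, hrv x]
        simp only [List.count_cons, BEq.rfl, if_true]
        push_cast; ring
      · rw [if_neg hxc, hrv x]
        congr 1
        simp [Ne.symm hxc]
    have key : right2.keys.Nodup ∧ (∀ x, right2.contains x = true ↔ x ∈ r')
        ∧ (∀ x, right2.getD x 0 = (r'.count x : Int)) := by
      by_cases hmem : c ∈ r'
      · have hcount : r'.count c ≠ 0 := by
          simpa [List.count_eq_zero] using hmem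
        have hcond : (right1.getD c 0 == 0) = false := by
          rw [hr1v c]; simp; exact_mod_cast hcount
        have h2 : right2 = right1 := by rw [hR2, hcond]; simp
        refine ⟨h2 ▸ hr1n, ?_, ?_⟩
        · intro x
          rw [h2, hr1m x, List.mem_cons]
          constructor
          · rintro (rfl | hx); exact hmem; exact hx
          · intro hx; exact Or.inr hx
        · intro x; rw [h2, hr1v x]
      · have hcount : r'.count c = 0 := List.count_eq_zero.mpr hmem
        have hcond : (right1.getD c 0 == 0) = true := by
          rw [hr1v c, hcount]; simp
        have h2 : right2 = right1.erase c := by rw [hR2, hcond]; simp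
        refine ⟨h2 ▸ nodup_keys_erase right1 c hr1n, ?_, ?_⟩
        · intro x
          rw [h2, contains_erase]
          by_cases hxc : x = c
          · subst hxc; simp [hmem]
          · simp only [Bool.and_eq_true, Bool.not_eq_true', beq_eq_false_iff_ne, ne_eq, hxc,
              not_false_eq_true, and_true, hr1m x, List.mem_cons]
            tauto
        · intro x
          by_cases hxc : x = c
          · subst hxc
            rw [h2, hcount, PySem.Dict.getD, get?_erase_self]
            rfl
          · rw [h2, PySem.Dict.getD, get?_erase_of_ne _ _ _ hxc, ← PySem.Dict.getD, hr1v x]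
    obtain ⟨hr2n, hr2m, hr2v⟩ := key
    have hlsz : left'.size = dcN (t ++ [c]) := by
      have hsk : left'.size = left'.keys.length := by simp [PySem.Dict.size, PySem.Dict.keys]
      rw [hsk]
      exact len_eq_dc _ _ hl'n (fun x => by
        rw [← PySem.Dict.contains_iff_mem_keys]; exact hl'm x)
    have hrsz : right2.size = dcN r' := by
      have hsk : right2.size = right2.keys.length := by simp [PySem.Dict.size, PySem.Dict.keys]
      rw [hsk]
      exact len_eq_dc _ _ hr2n (fun x => by
        rw [← PySem.Dict.contains_iff_mem_keys]; exact hr2m x)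
    rw [hstep, ih (t ++ [c]) _ left' right2 hl'n hl'm hr2n hr2m hr2v, modelCount]
    rw [hlsz, hrsz]
    by_cases hdc : dcN (t ++ [c]) = dcN r' <;> simp [hdc] <;> ring

lemma A_eq_model (s : String) : numSplits3 s = modelCount [] s.toList := by
  have h := foldA s.toList [] 0 PySem.Dict.empty (PySem.Dict.counter s.toList)
    PySem.Dict.nodup_keys_empty (by intro x; simp [PySem.Dict.contains_empty])
    (PySem.Dict.nodup_keys_counter _)
    (by intro x; rw [PySem.Dict.contains_counter]; simp)
    (by intro x; rw [PySem.Dict.getD_counter])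
  simpa [numSplits3] using h

lemma modelCount_eq_gSum (r : List Char) : ∀ t : List Char,
    modelCount t r = ((List.range r.length).map
      (fun i => if dcN (t ++ r.take (i + 1)) = dcN (r.drop (i + 1)) then (1 : Int) else 0)).sum := by
  induction r with
  | nil => intro t; simp [modelCount]
  | cons c r' ih =>
    intro t
    rw [modelCount, ih (t ++ [c])]
    simp only [List.length_cons, List.range_succ_eq_map, List.map_cons, List.map_map, List.sum_cons,
      List.take_succ_cons, List.take_zero, List.drop_succ_cons, List.drop_zero, List.append_assoc,
      List.singleton_append]
    congr 1

lemma scan_aux (l : List Char) : ∀ (seen : PySem.Set Char) (out : List Int),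
    l.foldl stepB (seen, out)
      = (PySem.Set.update seen l,
         out ++ (List.range l.length).map (fun i => PySem.Set.len (PySem.Set.update seen (l.take (i + 1))))) := by
  induction l with
  | nil => intro seen out; simp [PySem.Set.update]
  | cons c l' ih =>
    intro seen out
    rw [List.foldl_cons, show stepB (seen, out) c = (PySem.Set.add seen c, out ++ [PySem.Set.len (PySem.Set.add seen c)]) from rfl,
        ih]
    simp only [Prod.mk.injEq]
    refine ⟨rfl, ?_⟩
    simp [List.range_succ_eq_map, List.map_map, Function.comp, PySem.Set.update]

lemma scan_eq (cs : List Char) :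
    pvScanDistinct cs = (List.range cs.length).map (fun i => PySem.Set.len (PySem.Set.ofList (cs.take (i + 1)))) := by
  unfold pvScanDistinct
  rw [scan_aux cs PySem.Set.empty []]
  simp only [List.nil_append]
  apply List.map_congr_left
  intro i _
  rw [PySem.Set.ofList_eq_foldl]
  rfl

lemma pyRange_zero (m : Int) : PySem.List.pyRange 0 m = (List.range m.toNat).map (Nat.cast : Nat → Int) := by
  unfold PySem.List.pyRange
  norm_num
  split_ifs with h
  · induction (List.range m.toNat) with
    | nil => rfl
    | cons a l ihh => simp_all
  · have : m.toNat = 0 := by omega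
    simp [this]

lemma foldl_count (L : List Nat) (p : Nat → Bool) : ∀ (a : Int),
    L.foldl (fun acc i => if p i then acc + 1 else acc) a
      = a + (L.map (fun i => if p i then (1 : Int) else 0)).sum := by
  induction L with
  | nil => intro a; simp
  | cons x L' ih =>
    intro a
    rw [List.foldl_cons, ih]
    simp only [List.map_cons, List.sum_cons]
    split_ifs <;> ring

lemma set_len_ofList_reverse (l : List Char) :
    PySem.Set.len (PySem.Set.ofList l.reverse) = ((dcN l : Int)) := by
  unfold PySem.Set.len
  exact_mod_cast congrArg Nat.cast
    (len_eq_dc (PySem.Set.ofList l.reverse) l (PySem.Set.nodup_ofList _)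
      (fun x => by simp [PySem.Set.mem_ofList]))

lemma B_eq_gSum (s : String) : numSplits3_alt s = gSum s.toList (s.toList.length - 1) := by
  unfold numSplits3_alt
  rw [show PySem.Str.len s - 1 = ((s.toList.length : Int) - 1) from rfl]
  rw [pyRange_zero]
  simp only [List.foldl_map]
  rw [foldl_count, zero_add,
      show ((s.toList.length : Int) - 1).toNat = s.toList.length - 1 by omega]
  unfold gSum
  apply congrArg List.sum
  apply List.map_congr_left
  intro i hi
  simp only [List.mem_range] at hi
  have hn1 : 1 ≤ s.toList.length := by omega
  have hpre : PySem.List.pyGetD (pvScanDistinct s.toList) (i : Int) 0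
      = ((dcN (s.toList.take (i + 1)) : Int)) := by
    rw [PySem.List.pyGetD_natCast, scan_eq]
    rw [List.getD_eq_getElem _ _ (by simp only [List.length_map, List.length_range]; omega)]
    simp only [List.getElem_map, List.getElem_range]
    rfl
  have hsuf : PySem.List.pyGetD ((pvScanDistinct s.toList.reverse).reverse) ((i : Int) + 1) 0
      = ((dcN (s.toList.drop (i + 1)) : Int)) := by
    rw [show ((i : Int) + 1) = (((i + 1 : Nat)) : Int) by push_cast; ring]
    rw [PySem.List.pyGetD_natCast, scan_eq]
    rw [List.getD_eq_getElem _ _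
      (by simp only [List.length_reverse, List.length_map, List.length_range]; omega)]
    rw [List.getElem_reverse]
    simp only [List.length_map, List.length_range, List.length_reverse, List.getElem_map,
      List.getElem_range]
    rw [show s.toList.length - 1 - (i + 1) + 1 = s.toList.length - (i + 1) by omega]
    rw [List.take_reverse]
    rw [show s.toList.length - (s.toList.length - (i + 1)) = i + 1 by omega]
    exact set_len_ofList_reverse _
  rw [hpre, hsuf]
  by_cases hdc : dcN (s.toList.take (i + 1)) = dcN (s.toList.drop (i + 1))
  · simp [hdc]
  · have hb : (((dcN (s.toList.take (i + 1)) : Int)) == ((dcN (s.toList.drop (i + 1)) : Int))) = false := by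
      simp only [beq_eq_false_iff_ne, ne_eq]
      exact_mod_cast hdc
    simp [hb, hdc]

lemma gSum_drop_last (cs : List Char) : gSum cs cs.length = gSum cs (cs.length - 1) := by
  cases cs with
  | nil => rfl
  | cons c cs' =>
    have hne : dcN (c :: cs') ≠ dcN [] := by
      rw [show dcN ([] : List Char) = 0 from rfl]
      exact dcN_pos c cs'
    unfold gSum
    simp only [List.length_cons, Nat.add_sub_cancel]
    rw [List.range_succ, List.map_append, List.sum_append]
    simp [hne]

lemma model_eq_gSum_full (cs : List Char) : modelCount [] cs = gSum cs cs.length := by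
  rw [modelCount_eq_gSum cs []]
  unfold gSum
  simp only [List.nil_append]
  rfl

-- ===== VERDICT (by name: the statement is the Claim_ definition above) =====
theorem numSplits3_spec : Claim_equal_numSplits3 := by
  intro s _
  unfold Spec_numSplits3
  rw [A_eq_model, model_eq_gSum_full, gSum_drop_last, B_eq_gSum]
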